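-- pv_equiv track=rewrite | github.com/Isidore94/TradingBotV3 | scripts/master_avwap.py | _format_symbols_for_tc2000
-- ===== SOURCE A (Python) =====
-- def _format_symbols_for_tc2000(symbols) -> str:
--     cleaned = set()
--     for symbol in symbols or []:
--         text = str(symbol).strip().upper()
--         if not text:
--             continue
--         cleaned.add(text.split()[0])
--     cleaned = sorted(cleaned)
--     return ", ".join(cleaned) if cleaned else "None"
-- ===== SOURCE B (Python) =====
-- def _insert_unique(out, tok):
--     # insert tok into the sorted, duplicate-free list out, keeping it so
--     for i, existing in enumerate(out):
--         if existing == tok: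
--             return out
--         if tok < existing:
--             return out[:i] + [tok] + out[i:]
--     return out + [tok]
--
--
-- def _format_symbols_for_tc2000(symbols) -> str:
--     # One online pass: keep a sorted, duplicate-free list by ordered insertion;
--     # no set and no final sort call.
--     out = []
--     for symbol in symbols or []:
--         text = str(symbol).strip().upper()
--         if not text:
--             continue
--         out = _insert_unique(out, text.split()[0])
--     return ", ".join(out) if out else "None"
-- ===== Notes on version B (the rewrite author's own statement) =====
-- stated objective: alternative
-- what changed: Instead of accumulating tokens in a hash set and sorting at the end, B maintains one sorted duplicate-free list online, placing each cleaned token by ordered insertion (compare-and-splice) during the single pass, so neither a set nor a sort call exists.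
import Mathlib
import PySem

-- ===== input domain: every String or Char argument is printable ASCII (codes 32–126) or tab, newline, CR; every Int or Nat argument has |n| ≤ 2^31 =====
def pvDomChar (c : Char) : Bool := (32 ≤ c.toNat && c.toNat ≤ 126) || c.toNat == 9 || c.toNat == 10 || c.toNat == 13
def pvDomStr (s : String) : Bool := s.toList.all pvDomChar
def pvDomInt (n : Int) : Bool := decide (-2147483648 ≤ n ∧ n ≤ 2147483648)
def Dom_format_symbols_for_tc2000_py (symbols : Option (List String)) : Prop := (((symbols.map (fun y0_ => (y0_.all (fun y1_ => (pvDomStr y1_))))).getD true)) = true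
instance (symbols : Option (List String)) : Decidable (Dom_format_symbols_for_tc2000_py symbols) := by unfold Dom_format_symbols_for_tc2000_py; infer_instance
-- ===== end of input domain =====

-- B keeps one sorted duplicate-free list online by ordered insertion during the
-- single pass, instead of A's hash set plus a final sort; same result, no speed claim.

-- ===== PORT A =====
-- A's loop body: clean one symbol and add its first word to the set.
-- `text.split()[0]` is ported as `headD ""`: `text ≠ ""` after the check, so split₀
-- is never empty and Python's IndexError is unreachable.
def pvStepA (cleaned : PySem.Set String) (symbol : String) : PySem.Set String :=
  let text := PySem.Str.upper (PySem.Str.strip symbol)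
  if text = "" then cleaned
  else PySem.Set.add cleaned ((PySem.Str.split₀ text).headD "")

def format_symbols_for_tc2000_py (symbols : Option (List String)) : String :=
  let cleaned := (symbols.getD []).foldl pvStepA PySem.Set.empty
  let cl := PySem.List.sorted cleaned (fun x => x) false
  if cl ≠ [] then PySem.Str.join ", " cl else "None"

-- ===== PORT B =====
-- Source B's _insert_unique: walk the sorted list; drop tok on an equal element,
-- splice it in before the first greater element, else append at the end.
def pvInsertUnique : List String → String → List String
  | [], tok => [tok]
  | x :: xs, tok =>
      if x = tok then x :: xs
      else if tok < x then tok :: x :: xs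
      else x :: pvInsertUnique xs tok

-- B's loop body: clean one symbol and insert its first word in order.
def pvStepAlt (out : List String) (symbol : String) : List String :=
  let text := PySem.Str.upper (PySem.Str.strip symbol)
  if text = "" then out
  else pvInsertUnique out ((PySem.Str.split₀ text).headD "")

def format_symbols_for_tc2000_py_alt (symbols : Option (List String)) : String :=
  let out := (symbols.getD []).foldl pvStepAlt []
  if out ≠ [] then PySem.Str.join ", " out else "None"

-- ===== PRECONDITION & SPEC =====
def Spec_format_symbols_for_tc2000_py (symbols : Option (List String)) (out : String) : Prop := out = format_symbols_for_tc2000_py_alt symbols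
instance (symbols : Option (List String)) (out : String) : Decidable (Spec_format_symbols_for_tc2000_py symbols out) := by unfold Spec_format_symbols_for_tc2000_py; infer_instance

-- ===== CLAIM (what is proved, stated in full; the proofs are below) =====
def Claim_equal_format_symbols_for_tc2000_py : Prop := ∀ (symbols : Option (List String)), Dom_format_symbols_for_tc2000_py symbols → Spec_format_symbols_for_tc2000_py symbols (format_symbols_for_tc2000_py symbols)

-- ===== LEMMAS AND PROOFS =====

-- The multiset of cleaned tokens both loops consume.
def pvTokens (l : List String) : List String :=
  l.flatMap (fun s =>
    let text := PySem.Str.upper (PySem.Str.strip s)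
    if text = "" then [] else [(PySem.Str.split₀ text).headD ""])

-- A's fold is Set.ofList of the token list.
lemma pv_foldA (l : List String) (acc : List String) :
    l.foldl pvStepA (PySem.Set.ofList acc) = PySem.Set.ofList (acc ++ pvTokens l) := by
  induction l generalizing acc with
  | nil => simp [pvTokens]
  | cons x xs ih =>
      simp only [List.foldl_cons, pvStepA, pvTokens, List.flatMap_cons]
      by_cases h : PySem.Str.upper (PySem.Str.strip x) = ""
      · simpa [h, pvTokens] using ih acc
      · rw [if_neg h, ← PySem.Set.ofList_append_singleton]
        simpa [h, pvTokens] using ih (acc ++ [(PySem.Str.split₀ (PySem.Str.upper (PySem.Str.strip x))).headD ""])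

-- B's fold is the insertUnique fold over the token list.
lemma pv_foldB (l : List String) (acc : List String) :
    l.foldl pvStepAlt acc = (pvTokens l).foldl pvInsertUnique acc := by
  induction l generalizing acc with
  | nil => simp [pvTokens]
  | cons x xs ih =>
      simp only [List.foldl_cons, pvStepAlt, pvTokens, List.flatMap_cons]
      by_cases h : PySem.Str.upper (PySem.Str.strip x) = ""
      · simpa [h, pvTokens] using ih acc
      · simpa [h, pvTokens] using ih (pvInsertUnique acc ((PySem.Str.split₀ (PySem.Str.upper (PySem.Str.strip x))).headD ""))

lemma pv_mem_insertUnique (xs : List String) (tok a : String) :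
    a ∈ pvInsertUnique xs tok ↔ a ∈ xs ∨ a = tok := by
  induction xs with
  | nil => simp [pvInsertUnique]
  | cons x xs ih =>
      simp only [pvInsertUnique]
      split_ifs with h1 h2
      · subst h1; simp only [List.mem_cons]; tauto
      · simp only [List.mem_cons]; tauto
      · simp only [List.mem_cons, ih]; tauto

lemma pv_pairwise_insertUnique (xs : List String) (tok : String)
    (h : xs.Pairwise (· < ·)) : (pvInsertUnique xs tok).Pairwise (· < ·) := by
  induction xs with
  | nil => simp [pvInsertUnique]
  | cons x xs ih =>
      rcases List.pairwise_cons.mp h with ⟨hx, hxs⟩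
      simp only [pvInsertUnique]
      split_ifs with h1 h2
      · exact h
      · exact List.pairwise_cons.mpr ⟨by
          intro a ha
          rcases List.mem_cons.mp ha with rfl | ha
          · exact h2
          · exact lt_trans h2 (hx a ha), h⟩
      · have hxt : x < tok := lt_of_le_of_ne (le_of_not_gt h2) h1
        refine List.pairwise_cons.mpr ⟨?_, ih hxs⟩
        intro a ha
        rcases (pv_mem_insertUnique xs tok a).mp ha with ha | rfl
        · exact hx a ha
        · exact hxt

lemma pv_fold_insert_pairwise (ts : List String) (acc : List String)
    (h : acc.Pairwise (· < ·)) : (ts.foldl pvInsertUnique acc).Pairwise (· < ·) := by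
  induction ts generalizing acc with
  | nil => exact h
  | cons t ts ih => exact ih _ (pv_pairwise_insertUnique acc t h)

lemma pv_fold_insert_mem (ts : List String) (acc : List String) (a : String) :
    a ∈ ts.foldl pvInsertUnique acc ↔ a ∈ acc ∨ a ∈ ts := by
  induction ts generalizing acc with
  | nil => simp
  | cons t ts ih =>
      simp only [List.foldl_cons, ih, pv_mem_insertUnique, List.mem_cons]
      tauto

-- sorted(set(tokens)) equals the ordered-insertion fold over tokens.
lemma pv_sorted_set_eq_fold (ts : List String) :
    PySem.List.sorted (PySem.Set.ofList ts) (fun x => x) false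
      = ts.foldl pvInsertUnique [] := by
  have hpw : (ts.foldl pvInsertUnique []).Pairwise (· < ·) :=
    pv_fold_insert_pairwise ts [] (by simp)
  refine PySem.List.sorted_eq_of_perm_of_pairwise_lt _ _ _ ?_ hpw
  rw [List.perm_ext_iff_of_nodup (hpw.imp (fun h => ne_of_lt h)) (PySem.Set.nodup_ofList ts)]
  intro a
  rw [PySem.Set.mem_ofList, pv_fold_insert_mem]
  simp

-- ===== VERDICT (by name: the statement is the Claim_ definition above) =====
theorem format_symbols_for_tc2000_py_spec : Claim_equal_format_symbols_for_tc2000_py := by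
  intro symbols _
  unfold Spec_format_symbols_for_tc2000_py
  unfold format_symbols_for_tc2000_py format_symbols_for_tc2000_py_alt
  have hA := pv_foldA (symbols.getD []) []
  rw [show (PySem.Set.empty : PySem.Set String) = PySem.Set.ofList [] from rfl, hA]
  rw [pv_foldB (symbols.getD []) []]
  simp only [List.nil_append]
  rw [pv_sorted_set_eq_fold]
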